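-- pv_equiv track=rewrite | github.com/TheGoldKay/codewars | python/7kyu/hotspot.py | nonstop_hotspot
-- ===== SOURCE A (Python) =====
-- def nonstop_hotspot(area):
--     left = area.index('P') - 1
--     right = left + 2
--     hs = 0
--     while (left >= 0):
--         if(area[left] == '#'):
--             break
--         else:
--             if(area[left] == '*'):
--                 hs += 1
--             left -= 1
--     while(right < len(area)):
--         if(area[right] == '#'):
--             break
--         else:
--             if(area[right] == '*'):
--                 hs += 1
--             right += 1
--     return hs
-- ===== SOURCE B (Python) =====
-- def nonstop_hotspot(area):
--     # single left-to-right pass: count stars of the current '#'-free segment,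
--     # return that count at the first '#' after P (or at the end of the string)
--     stars = 0
--     seen_p = False
--     for ch in area:
--         if ch == '#':
--             if seen_p:
--                 return stars
--             stars = 0
--         else:
--             if ch == 'P':
--                 seen_p = True
--             if ch == '*':
--                 stars += 1
--     if not seen_p:
--         raise ValueError("substring not found")
--     return stars
-- ===== Notes on version B (the rewrite author's own statement) =====
-- stated objective: alternative
-- what changed: B replaces index('P') plus two break-driven directional scans (leftwards then rightwards from P) with a single left-to-right pass that keeps the star count of the current '#'-delimited segment and returns it once the segment containing P ends.
import Mathlib
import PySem

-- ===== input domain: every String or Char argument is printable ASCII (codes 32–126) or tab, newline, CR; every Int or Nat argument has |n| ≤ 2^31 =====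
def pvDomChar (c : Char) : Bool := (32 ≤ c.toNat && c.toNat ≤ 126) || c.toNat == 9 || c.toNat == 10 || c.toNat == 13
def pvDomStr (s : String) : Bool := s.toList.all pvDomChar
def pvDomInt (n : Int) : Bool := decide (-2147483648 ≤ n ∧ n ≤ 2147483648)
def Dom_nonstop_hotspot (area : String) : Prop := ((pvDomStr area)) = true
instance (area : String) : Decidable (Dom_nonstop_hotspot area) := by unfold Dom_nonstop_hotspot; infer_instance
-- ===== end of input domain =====

-- B is a single left-to-right pass over the string (one segment counter + a seen-P flag)
-- instead of A's index('P') followed by two break-driven directional scans; same O(n) cost.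
-- On strings without 'P' both Pythons raise ValueError; Pre_ excludes exactly those.

-- ===== PORT A =====
-- 'while left >= 0: … break / hs += … / left -= 1'; area[left] is in bounds whenever the
-- guard holds (left < len follows from left ≤ p - 1 < len), so pyGetD's default is never read.
def pvGoLeft (s : List Char) (left : Int) (hs : Int) : Int :=
  if h : 0 ≤ left then
    if PySem.List.pyGetD s left ' ' = '#' then hs
    else pvGoLeft s (left - 1) (if PySem.List.pyGetD s left ' ' = '*' then hs + 1 else hs)
  else hs
termination_by (left + 1).toNat
decreasing_by omega

def pvGoRight (s : List Char) (right : Int) (hs : Int) : Int :=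
  if h : right < (s.length : Int) then
    if PySem.List.pyGetD s right ' ' = '#' then hs
    else pvGoRight s (right + 1) (if PySem.List.pyGetD s right ' ' = '*' then hs + 1 else hs)
  else hs
termination_by ((s.length : Int) - right).toNat
decreasing_by omega

def nonstop_hotspot (area : String) : Int :=
  let s := area.toList
  let p := PySem.Chars.find s ['P']   -- area.index('P'): raises iff 'P' absent (excluded by Pre_)
  let left := p - 1
  let right := left + 2
  let hs := pvGoLeft s left 0
  pvGoRight s right hs

-- ===== PORT B =====
def pvAltGo (stars : Int) (seenP : Bool) : List Char → Int
  | [] => stars   -- Python raises ValueError here when seenP = false; excluded by Pre_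
  | c :: rest =>
    if c = '#' then
      if seenP then stars else pvAltGo 0 false rest
    else
      pvAltGo (if c = '*' then stars + 1 else stars) (seenP || c = 'P') rest

def nonstop_hotspot_alt (area : String) : Int :=
  pvAltGo 0 false area.toList

-- ===== PRECONDITION & SPEC =====
-- Pre_: 'P' occurs in area; on other inputs both A and B raise ValueError.
def Pre_nonstop_hotspot (area : String) : Prop := 'P' ∈ area.toList
instance (area : String) : Decidable (Pre_nonstop_hotspot area) := by
  unfold Pre_nonstop_hotspot; infer_instance

def pvWitness_nonstop_hotspot : String := "P"

def Spec_nonstop_hotspot (area : String) (out : Int) : Prop := out = nonstop_hotspot_alt area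
instance (area : String) (out : Int) : Decidable (Spec_nonstop_hotspot area out) := by
  unfold Spec_nonstop_hotspot; infer_instance

-- ===== CLAIM (what is proved, stated in full; the proofs are below) =====
def Claim_equal_nonstop_hotspot : Prop := ∀ (area : String), Dom_nonstop_hotspot area → Pre_nonstop_hotspot area → Spec_nonstop_hotspot area (nonstop_hotspot area)

-- ===== LEMMAS AND PROOFS =====

-- named predicate "not a wall", so simp cannot shift its normal form under our feet
def pvP (c : Char) : Bool := !(c == '#')

-- stars reachable walking left through u (scanned right-to-left), resp. right through v
def pvStarsL (u : List Char) : Int := ((u.reverse.takeWhile pvP).count '*' : Int)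
def pvStarsR (v : List Char) : Int := ((v.takeWhile pvP).count '*' : Int)

lemma pvP_true {c : Char} (hc : c ≠ '#') : pvP c = true := by simp [pvP, hc]

lemma pvP_false : pvP '#' = false := rfl

lemma tw_stop (l : List Char) : (l ++ ['#']).takeWhile pvP = l.takeWhile pvP := by
  induction l with
  | nil => rfl
  | cons d l ih =>
    rw [List.cons_append, List.takeWhile_cons, List.takeWhile_cons]
    by_cases hd : pvP d = true
    · rw [if_pos hd, if_pos hd, ih]
    · rw [if_neg hd, if_neg hd]

lemma tw_keep (l : List Char) (c : Char) (hc : pvP c = true) :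
    (l ++ [c]).takeWhile pvP = if '#' ∈ l then l.takeWhile pvP else l ++ [c] := by
  induction l with
  | nil =>
    rw [List.nil_append, List.takeWhile_cons, if_pos hc]
    simp
  | cons d l ih =>
    rw [List.cons_append, List.takeWhile_cons, List.takeWhile_cons]
    by_cases hd : d = '#'
    · subst hd
      simp [pvP]
    · rw [if_pos (pvP_true hd), if_pos (pvP_true hd), ih]
      have hmem : ('#' ∈ d :: l) ↔ ('#' ∈ l) := by
        simp only [List.mem_cons]
        constructor
        · rintro (h | h)
          · exact absurd h.symm hd
          · exact h
        · exact Or.inr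
      simp only [hmem]
      split_ifs <;> rfl

lemma pvGoLeft_spec (u t : List Char) (hs : Int) :
    pvGoLeft (u ++ t) ((u.length : Int) - 1) hs = hs + pvStarsL u := by
  induction u using List.reverseRecOn generalizing t hs with
  | nil =>
    rw [pvGoLeft, dif_neg (by simp)]
    simp [pvStarsL]
  | append_singleton u' c ih =>
    have hidx : ((u' ++ [c]).length : Int) - 1 = (u'.length : Int) := by
      simp
    rw [hidx, pvGoLeft, dif_pos (Int.natCast_nonneg _)]
    have hget : PySem.List.pyGetD ((u' ++ [c]) ++ t) ((u'.length : Int)) ' ' = c := by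
      rw [List.append_assoc, PySem.List.pyGetD_natCast, List.getD_eq_getElem?_getD,
        List.getElem?_append_right (Nat.le_refl _)]
      simp
    rw [hget]
    have hrev : pvStarsL (u' ++ [c]) = ((c :: u'.reverse.takeWhile pvP).count '*' : Int) ∨ True := Or.inr trivial
    by_cases hc : c = '#'
    · rw [if_pos hc]
      subst hc
      simp only [pvStarsL, List.reverse_append, List.reverse_singleton, List.singleton_append,
        List.takeWhile_cons, pvP_false]
      simp
    · rw [if_neg hc, List.append_assoc]
      rw [ih ([c] ++ t) (if c = '*' then hs + 1 else hs)]
      simp only [pvStarsL, List.reverse_append, List.reverse_singleton, List.singleton_append,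
        List.takeWhile_cons, if_pos (pvP_true hc), List.count_cons]
      by_cases hstar : c = '*'
      · simp only [hstar, if_pos (by decide : ('*' == '*') = true)]
        push_cast
        ring
      · simp only [if_neg hstar, if_neg (by simp [hstar] : ¬ ((c == '*') = true))]
        push_cast
        ring

lemma pvGoRight_spec (v w : List Char) (hs : Int) :
    pvGoRight (w ++ v) (w.length : Int) hs = hs + pvStarsR v := by
  induction v generalizing w hs with
  | nil =>
    rw [pvGoRight, dif_neg (by simp)]
    simp [pvStarsR]
  | cons c v' ih =>
    rw [pvGoRight, dif_pos (by simp)]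
    have hget : PySem.List.pyGetD (w ++ c :: v') ((w.length : Int)) ' ' = c := by
      rw [PySem.List.pyGetD_natCast, List.getD_eq_getElem?_getD,
        List.getElem?_append_right (Nat.le_refl _)]
      simp
    rw [hget]
    by_cases hc : c = '#'
    · rw [if_pos hc]; subst hc
      simp only [pvStarsR, List.takeWhile_cons, pvP_false]
      simp
    · rw [if_neg hc]
      rw [show w ++ c :: v' = (w ++ [c]) ++ v' by simp,
        show ((w.length : Int)) + 1 = (((w ++ [c]).length : Int)) by simp,
        ih (w ++ [c]) _]
      simp only [pvStarsR, List.takeWhile_cons, if_pos (pvP_true hc), List.count_cons]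
      by_cases hstar : c = '*'
      · simp only [hstar, if_pos (by decide : ('*' == '*') = true)]
        push_cast
        ring
      · simp only [if_neg hstar, if_neg (by simp [hstar] : ¬ ((c == '*') = true))]
        push_cast
        ring

lemma pvAltGo_true (v : List Char) (stars : Int) :
    pvAltGo stars true v = stars + pvStarsR v := by
  induction v generalizing stars with
  | nil => simp [pvAltGo, pvStarsR]
  | cons c v' ih =>
    by_cases hc : c = '#'
    · subst hc
      simp only [pvAltGo]
      simp only [pvStarsR, List.takeWhile_cons, pvP_false]
      simp
    · rw [show pvAltGo stars true (c :: v') =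
          pvAltGo (if c = '*' then stars + 1 else stars) true v' by
            simp [pvAltGo, hc]]
      rw [ih]
      simp only [pvStarsR, List.takeWhile_cons, if_pos (pvP_true hc), List.count_cons]
      by_cases hstar : c = '*'
      · simp only [hstar, if_pos (by decide : ('*' == '*') = true)]
        push_cast
        ring
      · simp only [if_neg hstar, if_neg (by simp [hstar] : ¬ ((c == '*') = true))]
        push_cast
        ring

lemma pvAltGo_false (u : List Char) (hP : 'P' ∉ u) (rest : List Char) (stars : Int) :
    pvAltGo stars false (u ++ rest) =
      pvAltGo (if '#' ∈ u then pvStarsL u else stars + pvStarsL u) false rest := by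
  induction u generalizing stars with
  | nil => simp [pvStarsL]
  | cons c u' ih =>
    have hPc : c ≠ 'P' := by intro h; exact hP (h ▸ List.mem_cons_self)
    have hPu' : 'P' ∉ u' := fun h => hP (List.mem_cons_of_mem _ h)
    by_cases hc : c = '#'
    · subst hc
      rw [show pvAltGo stars false (('#' :: u') ++ rest) =
            pvAltGo 0 false (u' ++ rest) by simp [pvAltGo]]
      rw [ih hPu']
      have hsl : pvStarsL ('#' :: u') = pvStarsL u' := by
        simp only [pvStarsL, List.reverse_cons, tw_stop]
      rw [if_pos (List.mem_cons_self), hsl]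
      split_ifs <;> norm_num
    · rw [show pvAltGo stars false ((c :: u') ++ rest) =
            pvAltGo (if c = '*' then stars + 1 else stars) false (u' ++ rest) by
              simp [pvAltGo, hc, hPc]]
      rw [ih hPu']
      have harg : (if '#' ∈ u' then pvStarsL u'
            else (if c = '*' then stars + 1 else stars) + pvStarsL u')
          = (if '#' ∈ c :: u' then pvStarsL (c :: u') else stars + pvStarsL (c :: u')) := by
        have hmem : ('#' ∈ c :: u') ↔ ('#' ∈ u') := by
          simp only [List.mem_cons]
          constructor
          · rintro (h | h)
            · exact absurd h.symm hc
            · exact h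
          · exact Or.inr
        simp only [hmem]
        have hsl : pvStarsL (c :: u') =
            ((u'.reverse ++ [c]).takeWhile pvP).count '*' := by
          simp only [pvStarsL, List.reverse_cons]
        by_cases hin : '#' ∈ u'
        · have hinr : '#' ∈ u'.reverse := List.mem_reverse.mpr hin
          rw [if_pos hin, if_pos hin, hsl, tw_keep _ _ (pvP_true hc), if_pos hinr]
          rfl
        · have hinr : '#' ∉ u'.reverse := fun h => hin (List.mem_reverse.mp h)
          rw [if_neg hin, if_neg hin, hsl, tw_keep _ _ (pvP_true hc), if_neg hinr]
          have hall : u'.reverse.takeWhile pvP = u'.reverse :=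
            List.takeWhile_eq_self_iff.mpr
              (fun x hx => pvP_true (fun he => hinr (he ▸ hx)))
          simp only [pvStarsL, hall, List.count_append]
          by_cases hstar : c = '*' <;> simp [hstar] <;> ring
      rw [harg]

lemma singleton_prefix_iff (l : List Char) :
    ['P'] <+: l ↔ l[0]? = some 'P' := by
  cases l with
  | nil => simp
  | cons a t =>
    constructor
    · intro h
      rcases h with ⟨r, hr⟩
      rw [List.singleton_append] at hr
      cases hr
      simp
    · intro h
      simp at h
      exact ⟨t, by simp [h]⟩

lemma find_P (u v : List Char) (hP : 'P' ∉ u) :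
    PySem.Chars.find (u ++ 'P' :: v) ['P'] = (u.length : Int) := by
  set s := u ++ 'P' :: v with hs
  have hmem : ('P' : Char) ∈ s := by simp [hs]
  have hinf : ['P'] <:+: s := by
    rcases List.append_of_mem hmem with ⟨a, b, hab⟩
    exact ⟨a, b, by simp [hab]⟩
  have hnn : 0 ≤ PySem.Chars.find s ['P'] := (PySem.Chars.find_nonneg_iff s ['P']).mpr hinf
  obtain ⟨hpre, hmin⟩ := PySem.Chars.find_spec hnn
  set k := (PySem.Chars.find s ['P']).toNat with hk
  have hul : k = u.length := by
    by_contra hne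
    rcases Nat.lt_or_ge k u.length with hlt | hge
    · have h0 : (s.drop k)[0]? = some 'P' := (singleton_prefix_iff _).mp hpre
      rw [List.getElem?_drop] at h0
      have hu : u[k + 0]? = some 'P' := by
        rw [hs] at h0
        rwa [List.getElem?_append_left (by omega)] at h0
      exact hP (List.mem_of_getElem? hu)
    · have hgt : u.length < k := lt_of_le_of_ne hge (fun h => hne h.symm)
      apply hmin u.length hgt
      rw [hs, List.drop_append_of_le_length (le_refl _)]
      simp
  have hfin : PySem.Chars.find s ['P'] = (k : Int) := by omega
  rw [hfin, hul]

-- ===== VERDICT (by name: the statement is the Claim_ definition above) =====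
theorem nonstop_hotspot_spec : Claim_equal_nonstop_hotspot := by
  intro area _ hpre
  unfold Spec_nonstop_hotspot
  have hsome : (PySem.List.index? area.toList 'P').isSome = true :=
    (PySem.List.index?_isSome_iff area.toList 'P').mpr hpre
  obtain ⟨k, hk⟩ := Option.isSome_iff_exists.mp hsome
  obtain ⟨u, v, huv, _, hPu⟩ := (PySem.List.index?_eq_some_iff area.toList 'P' k).mp hk
  simp only [nonstop_hotspot, nonstop_hotspot_alt]
  rw [huv, find_P u v hPu]
  -- A side
  have hA1 : pvGoLeft (u ++ 'P' :: v) ((u.length : Int) - 1) 0 = pvStarsL u := by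
    have h := pvGoLeft_spec u ('P' :: v) 0
    rw [h]; ring
  have hA2 : pvGoRight (u ++ 'P' :: v) ((u.length : Int) - 1 + 2) (pvStarsL u)
      = pvStarsL u + pvStarsR v := by
    rw [show u ++ 'P' :: v = (u ++ ['P']) ++ v by simp,
      show ((u.length : Int)) - 1 + 2 = (((u ++ ['P']).length : Int)) by simp; ring]
    exact pvGoRight_spec v (u ++ ['P']) (pvStarsL u)
  -- B side
  have hB : pvAltGo 0 false (u ++ 'P' :: v) = pvStarsL u + pvStarsR v := by
    rw [pvAltGo_false u hPu ('P' :: v) 0]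
    have hstep : ∀ st : Int, pvAltGo st false ('P' :: v) = pvAltGo st true v := by
      intro st; simp [pvAltGo]
    split_ifs with h
    · rw [hstep, pvAltGo_true]
    · rw [hstep, pvAltGo_true]; ring
  rw [hA1, hA2, hB]
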